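-- pv_equiv track=rewrite | github.com/dhwanitranjan/e4 | M16/05-nthwithproperty309-Python/nthwithproperty309.py | is309Num
-- ===== SOURCE A (Python) =====
-- def is309Num(n):
-- 	new = []
-- 	for i in range(10):
-- 		new.append(str(i))
-- 	x = str(n**5)
--
-- 	for i in new:
-- 		if i not in x:
-- 			return False
-- 	return True
-- ===== SOURCE B (Python) =====
-- def is309Num(n):
--     m = abs(n) ** 5
--     mask = 0
--     while m:
--         mask |= 1 << (m % 10)
--         m //= 10
--     return mask == 1023
-- ===== Notes on version B (the rewrite author's own statement) =====
-- stated objective: alternative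
-- what changed: Drops the string conversion entirely: instead of building ten digit strings and substring-scanning the decimal string of the fifth power for each, B extracts the decimal digits of the fifth power's absolute value arithmetically (repeated divmod by ten) while maintaining a ten-bit presence bitmask, and checks that all ten bits are set.
import Mathlib
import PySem

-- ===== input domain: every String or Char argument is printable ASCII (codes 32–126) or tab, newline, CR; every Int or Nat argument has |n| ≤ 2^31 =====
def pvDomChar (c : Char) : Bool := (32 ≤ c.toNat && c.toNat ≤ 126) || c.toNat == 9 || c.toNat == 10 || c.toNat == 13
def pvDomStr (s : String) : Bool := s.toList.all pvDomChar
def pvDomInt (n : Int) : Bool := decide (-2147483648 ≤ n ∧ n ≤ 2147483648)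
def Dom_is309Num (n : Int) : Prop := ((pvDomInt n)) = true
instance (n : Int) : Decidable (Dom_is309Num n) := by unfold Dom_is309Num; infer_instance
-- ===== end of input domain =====

-- B drops the string conversion: it extracts the decimal digits of abs(n)**5 by divmod 10,
-- maintaining a 10-bit presence bitmask, and compares the mask to 0b1111111111 (alternative algorithm).

-- ===== PORT A =====
-- 'for i in new: if i not in x: return False / return True' as structural recursion over new
def is309NumLoop (x : String) : List String → Bool
  | [] => true
  | i :: rest => if PySem.Str.isIn i x = false then false else is309NumLoop x rest

def is309Num (n : Int) : Bool :=
  let new := (PySem.List.pyRange 0 10 1).foldl (fun acc i => acc ++ [PySem.Int.toStr i]) []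
  let x := PySem.Int.toStr (n ^ 5)
  is309NumLoop x new

-- ===== PORT B =====
-- 'while m: mask |= 1 << (m % 10); m //= 10' — m = abs(n)**5 is nonnegative, so the loop lives on Nat
def is309NumMask (m : Nat) (mask : Nat) : Nat :=
  if m = 0 then mask else is309NumMask (m / 10) (mask ||| (1 <<< (m % 10)))
decreasing_by exact Nat.div_lt_self (Nat.pos_of_ne_zero (by assumption)) (by omega)

def is309Num_alt (n : Int) : Bool :=
  is309NumMask (n.natAbs ^ 5) 0 == 1023

-- ===== PRECONDITION & SPEC =====
def Spec_is309Num (n : Int) (out : Bool) : Prop := out = is309Num_alt n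
instance (n : Int) (out : Bool) : Decidable (Spec_is309Num n out) := by unfold Spec_is309Num; infer_instance

-- ===== CLAIM (what is proved, stated in full; the proofs are below) =====
def Claim_equal_is309Num : Prop := ∀ (n : Int), Dom_is309Num n → Spec_is309Num n (is309Num n)

-- ===== LEMMAS AND PROOFS =====

-- A's membership loop is an 'all' over the list of digit strings
theorem loop_eq_all (x : String) : ∀ l, is309NumLoop x l = l.all (fun i => PySem.Str.isIn i x)
  | [] => rfl
  | i :: rest => by
      rw [is309NumLoop, loop_eq_all x rest, List.all_cons]
      cases h : PySem.Str.isIn i x <;> simp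

-- with enough fuel, core's toDigitsCore renders the reversed digit list through digitChar
theorem toDigitsCore_eq (fuel : Nat) : ∀ (m : Nat) (acc : List Char), 0 < m → m < fuel →
    Nat.toDigitsCore 10 fuel m acc = ((Nat.digits 10 m).reverse.map Nat.digitChar) ++ acc := by
  induction fuel with
  | zero => intro m acc hm hf; omega
  | succ fuel ih =>
    intro m acc hm hf
    rw [Nat.toDigitsCore, Nat.digits_def' (by norm_num : 2 ≤ 10) hm]
    by_cases h0 : m / 10 = 0
    · simp [h0]
    · simp only [h0, if_false]
      rw [ih (m / 10) _ (Nat.pos_of_ne_zero h0)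
        (by have := Nat.div_lt_self hm (by omega : 1 < 10); omega)]
      simp

theorem mem_toDigits_iff (m : Nat) (c : Char) (hm : 0 < m) :
    c ∈ Nat.toDigits 10 m ↔ ∃ d ∈ Nat.digits 10 m, c = Nat.digitChar d := by
  rw [Nat.toDigits, toDigitsCore_eq (m + 1) m [] hm (by omega)]
  simp [eq_comm]

-- the bits of the bitmask loop's result are exactly the digits encountered
theorem testBit_is309NumMask (m : Nat) : ∀ (mask d : Nat),
    Nat.testBit (is309NumMask m mask) d ↔ Nat.testBit mask d ∨ d ∈ Nat.digits 10 m := by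
  induction m using Nat.strong_induction_on with
  | _ m ih =>
    intro mask d
    rw [is309NumMask]
    by_cases h0 : m = 0
    · simp [h0]
    · simp only [h0, if_false]
      rw [ih (m / 10) (Nat.div_lt_self (Nat.pos_of_ne_zero h0) (by omega)),
        Nat.digits_def' (by norm_num : 2 ≤ 10) (Nat.pos_of_ne_zero h0),
        Nat.testBit_or, Nat.one_shiftLeft, Nat.testBit_two_pow]
      simp only [Bool.or_eq_true, decide_eq_true_eq, List.mem_cons]
      constructor
      · rintro ((h | h) | h)
        · exact Or.inl h
        · exact Or.inr (Or.inl h.symm)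
        · exact Or.inr (Or.inr h)
      · rintro (h | h | h)
        · exact Or.inl (Or.inl h)
        · exact Or.inl (Or.inr h.symm)
        · exact Or.inr h

theorem mask_eq_1023_iff (m : Nat) :
    (is309NumMask m 0 = 1023) ↔ ∀ d < 10, d ∈ Nat.digits 10 m := by
  constructor
  · intro h d hd
    have hb : Nat.testBit (is309NumMask m 0) d = true := by
      rw [h, show (1023 : Nat) = 2 ^ 10 - 1 from rfl, Nat.testBit_two_pow_sub_one]
      simpa using hd
    simpa using (testBit_is309NumMask m 0 d).mp hb
  · intro h
    apply Nat.eq_of_testBit_eq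
    intro i
    rw [show (1023 : Nat) = 2 ^ 10 - 1 from rfl, Nat.testBit_two_pow_sub_one,
      Bool.eq_iff_iff, testBit_is309NumMask]
    simp only [Nat.zero_testBit, Bool.false_eq_true, false_or, decide_eq_true_eq]
    exact ⟨fun hm => Nat.digits_lt_base (by norm_num) hm, fun hi => h i hi⟩

-- digitChar is injective below 10
theorem digitChar_inj (a b : Nat) (ha : a < 10) (hb : b < 10)
    (h : Nat.digitChar a = Nat.digitChar b) : a = b := by
  interval_cases a <;> interval_cases b <;> simp_all [Nat.digitChar]

-- A's chain over ["0",…,"9"] as a char-membership statement on the character list of str(n**5)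
theorem is309Num_eq_forall (n : Int) :
    is309Num n = true ↔
      ∀ c ∈ ['0','1','2','3','4','5','6','7','8','9'], c ∈ PySem.Int.toChars (n ^ 5) := by
  show is309NumLoop (PySem.Int.toStr (n ^ 5))
      ["0", "1", "2", "3", "4", "5", "6", "7", "8", "9"] = true ↔ _
  rw [loop_eq_all]
  simp [PySem.Str.isIn, PySem.Chars.isIn_iff_infix, List.singleton_infix_iff,
    PySem.Int.toList_toStr]

theorem is309Num_eq_alt (n : Int) : is309Num n = is309Num_alt n := by
  by_cases hn0 : n = 0
  · subst hn0
    have hA : is309Num 0 ≠ true := fun h => by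
      have h1 := (is309Num_eq_forall 0).mp h '1' (by simp)
      rw [show PySem.Int.toChars ((0:Int) ^ 5) = ['0'] from rfl] at h1
      simp at h1
    have hB : is309Num_alt 0 = false := by
      rw [is309Num_alt, show ((0:Int).natAbs ^ 5) = 0 from rfl, is309NumMask]
      rfl
    rw [Bool.eq_false_iff.mpr hA, hB]
  · have hm : 0 < n.natAbs ^ 5 := pow_pos (Int.natAbs_pos.mpr hn0) 5
    have habs : (n ^ 5).natAbs = n.natAbs ^ 5 := Int.natAbs_pow n 5
    rw [Bool.eq_iff_iff, is309Num_eq_forall, is309Num_alt, beq_iff_eq, mask_eq_1023_iff]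
    have hchars : ∀ c : Char, c ≠ '-' →
        (c ∈ PySem.Int.toChars (n ^ 5) ↔ c ∈ Nat.toDigits 10 (n.natAbs ^ 5)) := by
      intro c hc
      unfold PySem.Int.toChars
      split_ifs with hneg
      · rw [habs]; simp [hc]
      · rw [show (n ^ 5).toNat = n.natAbs ^ 5 by omega]
    constructor
    · intro h d hd
      have hdig : Nat.digitChar d ∈ ['0','1','2','3','4','5','6','7','8','9'] := by
        interval_cases d <;> decide
      have hmem := (hchars (Nat.digitChar d) (by interval_cases d <;> decide)).mp (h _ hdig)
      rcases (mem_toDigits_iff _ _ hm).mp hmem with ⟨e, he, heq⟩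
      exact (digitChar_inj d e hd (Nat.digits_lt_base (by norm_num) he) heq) ▸ he
    · intro h c hc
      have : ∃ d < 10, c = Nat.digitChar d := by
        fin_cases hc
        exacts [⟨0, by omega, rfl⟩, ⟨1, by omega, rfl⟩, ⟨2, by omega, rfl⟩,
          ⟨3, by omega, rfl⟩, ⟨4, by omega, rfl⟩, ⟨5, by omega, rfl⟩,
          ⟨6, by omega, rfl⟩, ⟨7, by omega, rfl⟩, ⟨8, by omega, rfl⟩, ⟨9, by omega, rfl⟩]
      rcases this with ⟨d, hd, rfl⟩
      exact (hchars (Nat.digitChar d) (by interval_cases d <;> decide)).mpr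
        ((mem_toDigits_iff _ _ hm).mpr ⟨d, h d hd, rfl⟩)

-- ===== VERDICT (by name: the statement is the Claim_ definition above) =====
theorem is309Num_spec : Claim_equal_is309Num := by
  intro n _
  exact is309Num_eq_alt n
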